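-- pv_equiv track=rewrite | github.com/anich003/sudoku | sudoku.py | are_zones_valid
-- ===== SOURCE A (Python) =====
-- def are_zones_valid(puzzle):
--     n = len(puzzle[0])
--     zones = {}
--     for row in range(n):
--         for col in range(n):
--             zone = get_zone(row, col)
--             list_ = zones.get(zone, [])
--             list_.append(puzzle[row][col])
--             zones[zone] = list_
--
--     for zone, list_ in zones.items():
--         values = [v for v in list_ if type(v) == int]
--         if len(set(values)) != len(values):
--             return False
--     return True
--
-- def get_zone(row, col) -> (int, int):
--     return (row//3,col//3)
-- ===== SOURCE B (Python) =====
-- def are_zones_valid(puzzle):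
--     n = len(puzzle[0])
--     blocks = (n + 2) // 3
--     for zr in range(blocks):
--         for zc in range(blocks):
--             values = [puzzle[r][c]
--                       for r in range(3 * zr, min(3 * zr + 3, n))
--                       for c in range(3 * zc, min(3 * zc + 3, n))
--                       if type(puzzle[r][c]) == int]
--             if len(set(values)) != len(values):
--                 return False
--     return True
-- ===== Notes on version B (the rewrite author's own statement) =====
-- stated objective: simpler
-- what changed: B drops A's dict-building grouping pass (get_zone keys, insertion-ordered dict, second items() loop) and instead walks the 3x3 blocks directly, slicing each block's cells out of the grid with nested ranges and checking it for duplicates on the spot.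
import Mathlib
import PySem

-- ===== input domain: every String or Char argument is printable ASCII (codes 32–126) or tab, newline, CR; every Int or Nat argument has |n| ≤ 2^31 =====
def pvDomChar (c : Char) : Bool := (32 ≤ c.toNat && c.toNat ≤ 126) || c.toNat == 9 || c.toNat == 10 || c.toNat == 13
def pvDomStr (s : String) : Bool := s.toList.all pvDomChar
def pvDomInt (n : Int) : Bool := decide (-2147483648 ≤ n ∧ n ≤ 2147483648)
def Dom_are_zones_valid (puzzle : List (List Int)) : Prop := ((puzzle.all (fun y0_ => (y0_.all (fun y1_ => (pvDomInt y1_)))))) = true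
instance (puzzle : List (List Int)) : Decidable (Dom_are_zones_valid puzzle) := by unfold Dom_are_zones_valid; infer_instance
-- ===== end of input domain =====

-- B re-implements the check block-by-block (no dict, no get_zone grouping pass); same return value, proved below.

-- ===== PORT A =====
-- helper of A: get_zone(row, col) = (row//3, col//3)
def get_zone (row col : Int) : Int × Int :=
  (PySem.Int.floordiv row 3, PySem.Int.floordiv col 3)

def are_zones_valid (puzzle : List (List Int)) : Bool :=
  -- n = len(puzzle[0])  (IndexError on empty puzzle is excluded by Pre_)
  let n : Int := ((PySem.List.pyGet? puzzle 0).getD []).length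
  let zones : PySem.Dict (Int × Int) (List Int) :=
    (PySem.List.pyRange 0 n).foldl (fun zones row =>
      (PySem.List.pyRange 0 n).foldl (fun zones col =>
        let zone := get_zone row col
        let list_ := zones.getD zone []
        -- list_.append(puzzle[row][col]); zones[zone] = list_
        let list_ := list_ ++ [(PySem.List.pyGet? ((PySem.List.pyGet? puzzle row).getD []) col).getD 0]
        zones.insert zone list_) zones) PySem.Dict.empty
  -- for zone, list_ in zones.items(): values = [v for v in list_ if type(v) == int]
  -- (the type(v) == int guard is always true on a List Int, so values = list_);
  -- the early-'return False' loop is .all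
  zones.items.all (fun p => (PySem.Set.ofList p.2).length == p.2.length)

-- ===== PORT B =====
def are_zones_valid_alt (puzzle : List (List Int)) : Bool :=
  let n : Int := ((PySem.List.pyGet? puzzle 0).getD []).length
  let blocks : Int := PySem.Int.floordiv (n + 2) 3
  (PySem.List.pyRange 0 blocks).all (fun zr =>
    (PySem.List.pyRange 0 blocks).all (fun zc =>
      -- values = [puzzle[r][c] for r in … for c in … if type(puzzle[r][c]) == int]
      -- (the type(…) == int guard is always true on a List Int)
      let values := (PySem.List.pyRange (3*zr) (min (3*zr+3) n)).flatMap (fun r =>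
        (PySem.List.pyRange (3*zc) (min (3*zc+3) n)).map (fun c =>
          (PySem.List.pyGet? ((PySem.List.pyGet? puzzle r).getD []) c).getD 0))
      (PySem.Set.ofList values).length == values.length))

-- ===== PRECONDITION & SPEC =====
-- Pre_ = exactly the inputs where Python A returns: puzzle nonempty (else len(puzzle[0])
-- raises IndexError) and, with n = len(puzzle[0]), every access puzzle[row][col] for
-- row, col < n in range (else IndexError).
def Pre_are_zones_valid (puzzle : List (List Int)) : Prop :=
  puzzle ≠ [] ∧ (puzzle.headD []).length ≤ puzzle.length ∧
    ∀ row ∈ puzzle.take (puzzle.headD []).length, (puzzle.headD []).length ≤ row.length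
instance (puzzle : List (List Int)) : Decidable (Pre_are_zones_valid puzzle) := by
  unfold Pre_are_zones_valid; infer_instance

def pvWitness_are_zones_valid : List (List Int) := [[1,2,3],[4,5,6],[7,8,9]]

def Spec_are_zones_valid (puzzle : List (List Int)) (out : Bool) : Prop := out = are_zones_valid_alt puzzle
instance (puzzle : List (List Int)) (out : Bool) : Decidable (Spec_are_zones_valid puzzle out) := by unfold Spec_are_zones_valid; infer_instance

-- ===== CLAIM (what is proved, stated in full; the proofs are below) =====
def Claim_equal_are_zones_valid : Prop := ∀ (puzzle : List (List Int)), Dom_are_zones_valid puzzle → Pre_are_zones_valid puzzle → Spec_are_zones_valid puzzle (are_zones_valid puzzle)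

-- ===== LEMMAS AND PROOFS =====

-- abstractions of the shared data the two ports traverse differently
def pvOk (l : List Int) : Bool := (PySem.Set.ofList l).length == l.length
def pvG (puzzle : List (List Int)) (r c : Nat) : Int := (puzzle.getD r []).getD c 0
def pvBlockRange (m z : Nat) : List Nat := List.range' (3*z) (min (3*z+3) m - 3*z)
def pvBlock (puzzle : List (List Int)) (m zr zc : Nat) : List Int :=
  (pvBlockRange m zr).flatMap (fun r => (pvBlockRange m zc).map (pvG puzzle r))
def pvPairs (puzzle : List (List Int)) (m : Nat) : List ((Int × Int) × Int) :=
  (List.range m).flatMap (fun r => (List.range m).map (fun c =>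
    (((r / 3 : Nat), (c / 3 : Nat)), pvG puzzle r c)))

theorem pv_head (puzzle : List (List Int)) : (PySem.List.pyGet? puzzle 0).getD [] = puzzle.headD [] := by
  rw [show (0:Int) = ((0:Nat):Int) by norm_num, PySem.List.pyGet?_natCast]
  cases puzzle <;> simp

theorem pv_fd3 (r : Nat) : PySem.Int.floordiv (r : Int) 3 = ((r / 3 : Nat) : Int) := by
  exact_mod_cast PySem.Int.floordiv_natCast r 3

theorem pv_pyRange_cast (a k : Nat) :
    PySem.List.pyRange (a : Int) ((a + k : Nat) : Int) = (List.range' a k).map (Nat.cast : Nat → Int) := by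
  induction k generalizing a with
  | zero => simp [PySem.List.pyRange]
  | succ k ih =>
      rw [PySem.List.pyRange_one_cons (by exact_mod_cast Nat.lt_add_of_pos_right k.succ_pos)]
      rw [List.range'_succ]
      rw [show ((a : Int) + 1) = ((a + 1 : Nat) : Int) by push_cast; ring]
      rw [show ((a + (k+1) : Nat) : Int) = ((a + 1 + k : Nat) : Int) by push_cast; ring]
      rw [ih (a+1)]
      simp

theorem pv_filter_div3 (m z : Nat) :
    (List.range m).filter (fun x => x / 3 == z) = pvBlockRange m z := by
  induction m with
  | zero => simp [pvBlockRange]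
  | succ m ih =>
      rw [List.range_succ, List.filter_append, ih]
      unfold pvBlockRange
      by_cases h : m / 3 = z
      · have h1 : 3*z ≤ m ∧ m < 3*z+3 := by omega
        have h2 : min (3*z+3) (m+1) - 3*z = (min (3*z+3) m - 3*z) + 1 := by omega
        have h3 : min (3*z+3) m - 3*z = m - 3*z := by omega
        rw [h2, List.range'_concat]
        simp [h, h3]
        omega
      · have h2 : min (3*z+3) (m+1) - 3*z = min (3*z+3) m - 3*z := by omega
        simp [h, h2]

theorem pv_flatMap_filter {α β : Type} (l : List α) (p : α → Bool) (f : α → List β) :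
    (l.filter p).flatMap f = l.flatMap (fun a => if p a then f a else []) := by
  induction l with
  | nil => simp
  | cons a l ih => by_cases h : p a <;> simp [h, ih]

-- the per-zone list A groups equals the block list B enumerates
theorem pv_group_eq_block (puzzle : List (List Int)) (m zr zc : Nat) :
    ((pvPairs puzzle m).filter (fun p => p.1 == (((zr : Nat) : Int), ((zc : Nat) : Int)))).map (fun x => x.2)
      = pvBlock puzzle m zr zc := by
  unfold pvPairs pvBlock
  rw [show pvBlockRange m zr = (List.range m).filter (fun x => x / 3 == zr) from (pv_filter_div3 m zr).symm]
  rw [show pvBlockRange m zc = (List.range m).filter (fun x => x / 3 == zc) from (pv_filter_div3 m zc).symm]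
  rw [pv_flatMap_filter]
  simp only [List.filter_flatMap, List.map_flatMap]
  refine List.flatMap_congr ?_
  intro r _
  rw [List.filter_map, List.map_map]
  by_cases h : r / 3 = zr
  · have hp : ((fun p => p.1 == (((zr : Nat) : Int), ((zc : Nat) : Int))) ∘
        (fun c => ((((r / 3 : Nat) : Int), ((c / 3 : Nat) : Int)), pvG puzzle r c)))
        = (fun c => c / 3 == zc) := by
      funext c
      simp [h]
      omega
    rw [hp, if_pos (by simpa using h)]
    rfl
  · have hp : ((fun p => p.1 == (((zr : Nat) : Int), ((zc : Nat) : Int))) ∘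
        (fun c => ((((r / 3 : Nat) : Int), ((c / 3 : Nat) : Int)), pvG puzzle r c)))
        = (fun _ => false) := by
      funext c
      simp
      intro h1
      exfalso
      omega
    rw [hp, if_neg (by simpa using h)]
    simp

-- the zone keys A's dict collects are exactly the block coordinates B enumerates
theorem pv_mem_keys_iff (puzzle : List (List Int)) (m : Nat) (k : Int × Int) :
    k ∈ (pvPairs puzzle m).map (fun p => p.1) ↔
      ∃ zr zc : Nat, zr < (m+2)/3 ∧ zc < (m+2)/3 ∧ k = (((zr : Nat) : Int), ((zc : Nat) : Int)) := by
  unfold pvPairs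
  simp only [List.map_flatMap, List.map_map, List.mem_flatMap, List.mem_map, List.mem_range,
    Function.comp]
  constructor
  · rintro ⟨r, hr, c, hc, rfl⟩
    exact ⟨r / 3, c / 3, by omega, by omega, rfl⟩
  · rintro ⟨zr, zc, hzr, hzc, rfl⟩
    exact ⟨3*zr, by omega, 3*zc, by omega, by rw [Nat.mul_div_cancel_left zr (by norm_num), Nat.mul_div_cancel_left zc (by norm_num)]⟩

theorem pv_A_eq (puzzle : List (List Int)) :
    are_zones_valid puzzle =
      ((pvPairs puzzle (puzzle.headD []).length).foldl
        (fun d p => d.modify p.1 [] (fun x => x ++ [p.2])) PySem.Dict.empty).items.all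
        (fun p => pvOk p.2) := by
  simp only [are_zones_valid]
  rw [pv_head, PySem.List.pyRange_zero_natCast]
  simp only [List.foldl_map, pvPairs, List.foldl_flatMap]
  simp only [get_zone, pv_fd3, PySem.List.pyGet?_natCast, ← List.getD_eq_getElem?_getD]
  rfl

theorem pv_B_block (puzzle : List (List Int)) (m zr zc : Nat)
    (hzr : 3*zr ≤ m) (hzc : 3*zc ≤ m) :
    (PySem.List.pyRange (3*(zr:Int)) (min (3*(zr:Int)+3) (m:Int))).flatMap (fun r =>
        (PySem.List.pyRange (3*(zc:Int)) (min (3*(zc:Int)+3) (m:Int))).map (fun c =>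
          (PySem.List.pyGet? ((PySem.List.pyGet? puzzle r).getD []) c).getD 0))
      = pvBlock puzzle m zr zc := by
  have e1 : (3*(zr:Int)) = ((3*zr : Nat) : Int) := by push_cast; ring
  have e2 : min (3*(zr:Int)+3) (m:Int) = ((3*zr + (min (3*zr+3) m - 3*zr) : Nat) : Int) := by
    push_cast [Nat.cast_min]; omega
  have e3 : (3*(zc:Int)) = ((3*zc : Nat) : Int) := by push_cast; ring
  have e4 : min (3*(zc:Int)+3) (m:Int) = ((3*zc + (min (3*zc+3) m - 3*zc) : Nat) : Int) := by
    push_cast [Nat.cast_min]; omega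
  rw [e2, e4, e1, e3, pv_pyRange_cast, pv_pyRange_cast]
  rw [List.flatMap_map]
  unfold pvBlock pvBlockRange
  refine List.flatMap_congr ?_
  intro r _
  rw [List.map_map]
  apply List.map_congr_left
  intro c _
  simp only [Function.comp, PySem.List.pyGet?_natCast, pvG, List.getD_eq_getElem?_getD]

theorem pv_B_eq (puzzle : List (List Int)) :
    are_zones_valid_alt puzzle = true ↔
      (∀ zr zc : Nat, zr < ((puzzle.headD []).length + 2)/3 → zc < ((puzzle.headD []).length + 2)/3 →
        pvOk (pvBlock puzzle (puzzle.headD []).length zr zc) = true) := by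
  simp only [are_zones_valid_alt]
  rw [pv_head]
  rw [show ((((puzzle.headD []).length : Int)) + 2) = (((puzzle.headD []).length + 2 : Nat) : Int) by push_cast; ring]
  rw [pv_fd3, PySem.List.pyRange_zero_natCast]
  simp only [List.all_map, Function.comp, List.all_eq_true, List.mem_range]
  constructor
  · intro h zr zc hzr hzc
    have := h zr hzr zc hzc
    rwa [pv_B_block puzzle _ zr zc (by omega) (by omega)] at this
  · intro h zr hzr zc hzc
    rw [pv_B_block puzzle _ zr zc (by omega) (by omega)]
    exact h zr zc hzr hzc

-- ===== VERDICT (by name: the statement is the Claim_ definition above) =====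
theorem are_zones_valid_spec : Claim_equal_are_zones_valid := by
  unfold Claim_equal_are_zones_valid Spec_are_zones_valid
  intro puzzle _ _
  rw [← Bool.coe_iff_coe, pv_A_eq, pv_B_eq]
  set m := (puzzle.headD []).length with hm
  set L := pvPairs puzzle m with hL
  set dictD := L.foldl (fun d p => d.modify p.1 [] (fun x => x ++ [p.2])) PySem.Dict.empty with hD
  have hnd : dictD.keys.Nodup := by
    rw [hD]
    exact PySem.Dict.nodup_keys_foldl_modify_key L Prod.fst [] (fun d p => (· ++ [p.2])) _
      (by simp [PySem.Dict.keys_empty])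
  have hkeys : ∀ k, k ∈ dictD.keys ↔ k ∈ L.map (fun p => p.1) := by
    intro k
    rw [hD, PySem.Dict.keys_foldl_modify_key L Prod.fst [] (fun d p => (· ++ [p.2])),
      PySem.Dict.keys_empty, PySem.Set.mem_update]
    simp
  have hgetD : ∀ k, dictD.getD k [] = ((L.filter (fun p => p.1 == k)).map (fun x => x.2)) := by
    intro k
    rw [hD, PySem.Dict.getD_foldl_modify_append]
    simp [PySem.Dict.getD_empty]
  rw [PySem.Dict.items_eq_map_keys dictD hnd [], List.all_map]
  simp only [Function.comp, List.all_eq_true]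
  constructor
  · intro h zr zc hzr hzc
    have hk : (((zr:Nat):Int), ((zc:Nat):Int)) ∈ dictD.keys :=
      (hkeys _).mpr ((pv_mem_keys_iff puzzle m _).mpr ⟨zr, zc, hzr, hzc, rfl⟩)
    have := h _ hk
    rwa [hgetD, hL, pv_group_eq_block] at this
  · intro h k hk
    obtain ⟨zr, zc, hzr, hzc, rfl⟩ := (pv_mem_keys_iff puzzle m k).mp ((hkeys k).mp hk)
    rw [hgetD, hL, pv_group_eq_block]
    exact h zr zc hzr hzc
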